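-- pv_equiv track=rewrite | github.com/wanbch3/statistical-arbitrage | vnpy/trader/hqyu.py | get_symbol_kinds
-- ===== SOURCE A (Python) =====
-- from typing import Dict, List
--
-- def get_symbol_kinds(symbols: List[str]):
--     """
--     从合约列表中获取合约的品种和品种列表
--     """
--     kinds: Dict[str, List[str]] = {}
--     for symbol in symbols:
--         vt_symbol = symbol
--         kind = left_alphas(vt_symbol)
--         if kind not in kinds:
--             kinds[kind] = [vt_symbol]
--         else:
--             if vt_symbol not in kinds[kind]:
--                 kinds[kind].append(vt_symbol)
--
--     return kinds
--
-- def left_alphas(instr: str):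
--     """
--     得到字符串左边的字符部分
--     """
--     ret_str = ''
--     for s in instr:
--         if s.isalpha():
--             ret_str += s
--         else:
--             break
--     return ret_str
-- ===== SOURCE B (Python) =====
-- from typing import Dict, List
--
-- def get_symbol_kinds(symbols: List[str]):
--     # Phase 1: partition symbols into groups by alphabetic prefix (no membership checks).
--     kinds: Dict[str, List[str]] = {}
--     for symbol in symbols:
--         kinds.setdefault(left_alphas(symbol), []).append(symbol)
--     # Phase 2: dedup each group preserving first-occurrence order.
--     return {kind: list(dict.fromkeys(group)) for kind, group in kinds.items()}
--
-- def left_alphas(instr: str):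
--     for i, ch in enumerate(instr):
--         if not ch.isalpha():
--             return instr[:i]
--     return instr
-- ===== Notes on version B (the rewrite author's own statement) =====
-- stated objective: simpler
-- what changed: Replaced the single scan that tests membership in the growing group before each append by a two-pass decomposition: a plain partition pass with setdefault/append and a second pass deduplicating each group with dict.fromkeys; left_alphas returns a slice at the first non-letter instead of accumulating characters.
import Mathlib
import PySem

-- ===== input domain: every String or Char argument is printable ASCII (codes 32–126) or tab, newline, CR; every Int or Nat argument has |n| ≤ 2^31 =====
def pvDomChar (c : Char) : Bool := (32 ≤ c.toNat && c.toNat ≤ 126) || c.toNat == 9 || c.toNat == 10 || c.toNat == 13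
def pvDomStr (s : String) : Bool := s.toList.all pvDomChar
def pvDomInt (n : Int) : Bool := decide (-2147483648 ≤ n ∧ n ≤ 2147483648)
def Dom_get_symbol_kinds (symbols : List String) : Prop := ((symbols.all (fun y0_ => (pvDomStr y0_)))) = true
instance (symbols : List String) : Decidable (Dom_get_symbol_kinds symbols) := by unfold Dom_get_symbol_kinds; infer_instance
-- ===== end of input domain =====

-- B is a simpler two-pass decomposition (partition with no membership checks, then per-group ordered dedup);
-- equal return value, no speed claim.

-- ===== PORT A =====

-- A's left_alphas: build ret_str char by char, break at the first non-letter.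
def leftAlphasLoopA (acc : List Char) : List Char → List Char
  | [] => acc
  | c :: cs => if PySem.Str.isalpha c then leftAlphasLoopA (acc ++ [c]) cs else acc

def left_alphas_A (instr : String) : String :=
  String.ofList (leftAlphasLoopA [] instr.toList)

-- the body of A's for-loop over symbols
def stepA (kinds : PySem.Dict String (List String)) (symbol : String) : PySem.Dict String (List String) :=
  let kind := left_alphas_A symbol
  if kinds.contains kind = false then
    kinds.insert kind [symbol]
  else if symbol ∈ kinds.getD kind [] then
    kinds
  else
    kinds.modify kind [] (· ++ [symbol])    -- kinds[kind].append(symbol)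

def get_symbol_kinds (symbols : List String) : List (String × List String) :=
  (symbols.foldl stepA PySem.Dict.empty).items

-- ===== PORT B =====

-- B's left_alphas: scan for the first non-letter index i, return instr[:i] (whole string if none).
def leftAlphasLoopB (full : List Char) (i : Nat) : List Char → List Char
  | [] => full
  | c :: cs => if PySem.Str.isalpha c then leftAlphasLoopB full (i + 1) cs else full.take i

def left_alphas_B (instr : String) : String :=
  String.ofList (leftAlphasLoopB instr.toList 0 instr.toList)

-- phase 1: kinds.setdefault(kind, []).append(symbol)
def stepB (kinds : PySem.Dict String (List String)) (symbol : String) : PySem.Dict String (List String) :=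
  kinds.modify (left_alphas_B symbol) [] (· ++ [symbol])

def get_symbol_kinds_alt (symbols : List String) : List (String × List String) :=
  let kinds := symbols.foldl stepB PySem.Dict.empty
  -- dict comprehension over kinds.items() (keys already distinct): transform each group with dict.fromkeys dedup
  kinds.items.map (fun p => (p.1, PySem.List.dedup p.2))

-- ===== PRECONDITION & SPEC =====
def Spec_get_symbol_kinds (symbols : List String) (out : List (String × List String)) : Prop := out = get_symbol_kinds_alt symbols
instance (symbols : List String) (out : List (String × List String)) : Decidable (Spec_get_symbol_kinds symbols out) := by unfold Spec_get_symbol_kinds; infer_instance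

-- ===== CLAIM (what is proved, stated in full; the proofs are below) =====
def Claim_equal_get_symbol_kinds : Prop := ∀ (symbols : List String), Dom_get_symbol_kinds symbols → Spec_get_symbol_kinds symbols (get_symbol_kinds symbols)

-- ===== LEMMAS AND PROOFS =====

-- both prefix scanners compute takeWhile isalpha
theorem leftAlphasLoopA_eq (cs acc : List Char) :
    leftAlphasLoopA acc cs = acc ++ cs.takeWhile PySem.Str.isalpha := by
  induction cs generalizing acc with
  | nil => simp [leftAlphasLoopA]
  | cons c cs ih =>
    by_cases h : PySem.Str.isalpha c
    · simp [leftAlphasLoopA, h, ih]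
    · simp [leftAlphasLoopA, h]

theorem leftAlphasLoopB_eq (cs pre : List Char) :
    leftAlphasLoopB (pre ++ cs) pre.length cs = pre ++ cs.takeWhile PySem.Str.isalpha := by
  induction cs generalizing pre with
  | nil => simp [leftAlphasLoopB]
  | cons c cs ih =>
    by_cases h : PySem.Str.isalpha c
    · have := ih (pre ++ [c])
      simp only [List.length_append, List.length_cons, List.length_nil, List.append_assoc,
        List.cons_append, List.nil_append] at this
      simp [leftAlphasLoopB, h, this]
    · simp [leftAlphasLoopB, h]

theorem left_alphas_eq (s : String) : left_alphas_A s = left_alphas_B s := by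
  unfold left_alphas_A left_alphas_B
  rw [leftAlphasLoopA_eq]
  have := leftAlphasLoopB_eq s.toList []
  simpa using this.symm ▸ rfl

def mapValues (l : List (String × List String)) : List (String × List String) :=
  l.map (fun p => (p.1, PySem.List.dedup p.2))

theorem dedup_append_singleton_mem {g : List String} {s : String} (hs : s ∈ g) :
    PySem.Set.ofList (g ++ [s]) = PySem.Set.ofList g := by
  rw [PySem.Set.ofList_append_singleton]
  exact PySem.Set.add_of_mem ((PySem.Set.mem_ofList g s).2 hs)

theorem dedup_append_singleton_not_mem {g : List String} {s : String} (hs : ¬ s ∈ g) :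
    PySem.Set.ofList (g ++ [s]) = PySem.Set.ofList g ++ [s] := by
  have h' : ¬ s ∈ PySem.Set.ofList g := fun h => hs ((PySem.Set.mem_ofList g s).1 h)
  rw [PySem.Set.ofList_append_singleton]
  exact PySem.Set.add_of_not_mem h'

theorem step_inv (dA dB : PySem.Dict String (List String)) (s : String)
    (hnd : dB.keys.Nodup) (h : dA.items = mapValues dB.items) :
    (stepA dA s).items = mapValues (stepB dB s).items := by
  have hk := left_alphas_eq s
  simp only [stepA, stepB, PySem.Dict.modify]
  rw [← hk]
  set k := left_alphas_A s with hkdef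
  have hc : dA.contains k = dB.contains k := by
    simp [PySem.Dict.contains, h, mapValues, List.any_map, Function.comp_def]
  have hndA : dA.keys.Nodup := by
    have hkeys : dA.keys = dB.keys := by
      simp [PySem.Dict.keys, h, mapValues, List.map_map, Function.comp_def]
    rw [hkeys]; exact hnd
  by_cases hB : dB.contains k = true
  · -- k is already a key of both dicts
    obtain ⟨g, hg⟩ : ∃ g, dB.get? k = some g := by
      rw [PySem.Dict.contains_eq_isSome_get?] at hB
      exact Option.isSome_iff_exists.1 hB
    have hmem : (k, g) ∈ dB.items := PySem.Dict.mem_items_of_get?_eq_some dB hg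
    have hmemA : (k, PySem.List.dedup g) ∈ dA.items := by
      rw [h]
      exact List.mem_map_of_mem (f := fun p => (p.1, PySem.List.dedup p.2)) hmem
    have hA : dA.get? k = some (PySem.List.dedup g) :=
      PySem.Dict.get?_of_mem_items dA hmemA hndA
    have hgD : dB.getD k [] = g := by simp [PySem.Dict.getD, hg]
    have hgDA : dA.getD k [] = PySem.List.dedup g := by simp [PySem.Dict.getD, hA]
    have huniq : ∀ p ∈ dB.items, p.1 = k → p.2 = g := by
      intro p hp hpk
      have hp' : (k, p.2) ∈ dB.items := by rwa [← hpk]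
      have := PySem.Dict.get?_of_mem_items dB hp' hnd
      rw [hg] at this
      exact (Option.some_injective _ this.symm)
    rw [hgD, hc, hB]
    simp only [Bool.true_eq_false, if_false, hgDA]
    by_cases hs : s ∈ g
    · have hsd : s ∈ PySem.List.dedup g := by
        simpa [PySem.List.dedup, PySem.Set.mem_ofList] using hs
      rw [if_pos hsd, h, PySem.Dict.items_insert_of_contains _ _ hB]
      unfold mapValues
      rw [List.map_map]
      refine (List.map_congr_left ?_).symm
      intro p hp
      by_cases hpk : p.1 = k
      · simp [hpk, huniq p hp hpk, dedup_append_singleton_mem hs]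
      · simp [hpk]
    · have hsd : ¬ s ∈ PySem.List.dedup g := by
        simpa [PySem.List.dedup, PySem.Set.mem_ofList] using hs
      rw [if_neg hsd]
      have hcA : dA.contains k = true := by rw [hc]; exact hB
      rw [PySem.Dict.items_insert_of_contains _ _ hcA,
        PySem.Dict.items_insert_of_contains _ _ hB, h]
      unfold mapValues
      rw [List.map_map, List.map_map]
      apply List.map_congr_left
      intro p hp
      by_cases hpk : p.1 = k
      · simp [hpk, dedup_append_singleton_not_mem hs]
      · simp [hpk]
  · -- k is a fresh key
    have hB' : dB.contains k = false := by simpa using hB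
    have hcA : dA.contains k = false := by rw [hc]; exact hB'
    
    rw [PySem.Dict.getD_of_not_contains dB [] hB', hcA]
    rw [if_pos rfl]
    rw [PySem.Dict.items_insert_of_not_contains _ _ hcA,
      PySem.Dict.items_insert_of_not_contains _ _ hB', h]
    unfold mapValues
    rw [List.map_append]
    simp [PySem.List.dedup, PySem.Set.ofList]

theorem keys_nodup_stepB (dB : PySem.Dict String (List String)) (s : String)
    (hnd : dB.keys.Nodup) : (stepB dB s).keys.Nodup := by
  unfold stepB
  rw [PySem.Dict.modify]
  exact PySem.Dict.nodup_keys_insert _ _ _ hnd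

theorem fold_inv (symbols : List String) (dA dB : PySem.Dict String (List String))
    (hnd : dB.keys.Nodup) (h : dA.items = mapValues dB.items) :
    (symbols.foldl stepA dA).items = mapValues ((symbols.foldl stepB dB).items) := by
  induction symbols generalizing dA dB with
  | nil => simpa using h
  | cons s ss ih =>
    simp only [List.foldl_cons]
    exact ih _ _ (keys_nodup_stepB dB s hnd) (step_inv dA dB s hnd h)

-- ===== VERDICT (by name: the statement is the Claim_ definition above) =====
theorem get_symbol_kinds_spec : Claim_equal_get_symbol_kinds := by
  intro symbols _
  unfold Spec_get_symbol_kinds get_symbol_kinds get_symbol_kinds_alt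
  exact fold_inv symbols PySem.Dict.empty PySem.Dict.empty (by simp [PySem.Dict.keys, PySem.Dict.empty]) rfl
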